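-- pv_equiv track=rewrite | github.com/timleung22/AOC2017 | day20.py | removeCollided
-- ===== SOURCE A (Python) =====
-- def calculateParticle(position, velocity, acceleration, runs):
--     for i in range(runs):
--         velocity[0] += acceleration[0]
--         velocity[1] += acceleration[1]
--         velocity[2] += acceleration[2]
--         position[0] += velocity[0]
--         position[1] += velocity[1]
--         position[2] += velocity[2]
--
--     return [position[0], position[1], position[2]], [velocity[0], velocity[1], velocity[2]], acceleration
--
-- def formatPosition(newP):
--     return ','.join(str(p) for p in newP)
--
-- def removeCollided(positions, velocities, accelerations):
--     allPos = []
--     for iter in range(500):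
--         uniquePositions = set()
--         newPositions, newVelocities, newAccelerations = [], [], []
--         collided = set()
--         for i in range(len(positions)):
--             newP, newV, newA = calculateParticle(positions[i], velocities[i], accelerations[i], 1)
--             formattedPosition = formatPosition(newP)
--             if formattedPosition not in uniquePositions:
--                 uniquePositions.add(formattedPosition)
--                 newPositions.append(newP)
--                 newVelocities.append(newV)
--                 newAccelerations.append(newA)
--             else:
--                 collided.add(formatPosition(newP))
--
--         nextIterPositions, nextIterVelocities, nextIterAccelerations = [], [],[]
--         for i in range(len(newPositions)):
--             if formatPosition(newPositions[i]) not in collided: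
--                 nextIterPositions.append(newPositions[i])
--                 nextIterVelocities.append(newVelocities[i])
--                 nextIterAccelerations.append(newAccelerations[i])
--         positions = nextIterPositions
--         velocities = nextIterVelocities
--         accelerations = nextIterAccelerations
--         allPos.append(len(positions))
--
--     return allPos
-- ===== SOURCE B (Python) =====
-- # B: closed-form trajectories instead of step-by-step simulation: particle i's position after t
-- # steps is p0 + t*v0 + t*(t+1)//2 * a0 componentwise, so each round recomputes every surviving
-- # particle's position directly from the ORIGINAL data and keeps the indices whose position is
-- # unique that round. Unlike A, B does not mutate the caller's lists (return value equivalence).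
-- def removeCollided(positions, velocities, accelerations):
--     def posAt(i, t):
--         T = t * (t + 1) // 2
--         return tuple(positions[i][k] + t * velocities[i][k] + T * accelerations[i][k]
--                      for k in range(3))
--     active = list(range(len(positions)))
--     allPos = []
--     for t in range(1, 501):
--         cnt = {}
--         for i in active:
--             cnt[posAt(i, t)] = cnt.get(posAt(i, t), 0) + 1
--         active = [i for i in active if cnt[posAt(i, t)] == 1]
--         allPos.append(len(active))
--     return allPos
-- ===== Notes on version B (the rewrite author's own statement) =====
-- stated objective: alternative
-- what changed: B drops the step-by-step in-place simulation entirely: it keeps a list of surviving particle indices and, each round, recomputes every survivor's position in closed form (p0 + t*v0 + t(t+1)/2*a0) from the original data, filtering indices whose position occurs more than once, instead of A's advance-copy-dedupe rebuild of three parallel lists with string-keyed sets.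
import Mathlib
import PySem

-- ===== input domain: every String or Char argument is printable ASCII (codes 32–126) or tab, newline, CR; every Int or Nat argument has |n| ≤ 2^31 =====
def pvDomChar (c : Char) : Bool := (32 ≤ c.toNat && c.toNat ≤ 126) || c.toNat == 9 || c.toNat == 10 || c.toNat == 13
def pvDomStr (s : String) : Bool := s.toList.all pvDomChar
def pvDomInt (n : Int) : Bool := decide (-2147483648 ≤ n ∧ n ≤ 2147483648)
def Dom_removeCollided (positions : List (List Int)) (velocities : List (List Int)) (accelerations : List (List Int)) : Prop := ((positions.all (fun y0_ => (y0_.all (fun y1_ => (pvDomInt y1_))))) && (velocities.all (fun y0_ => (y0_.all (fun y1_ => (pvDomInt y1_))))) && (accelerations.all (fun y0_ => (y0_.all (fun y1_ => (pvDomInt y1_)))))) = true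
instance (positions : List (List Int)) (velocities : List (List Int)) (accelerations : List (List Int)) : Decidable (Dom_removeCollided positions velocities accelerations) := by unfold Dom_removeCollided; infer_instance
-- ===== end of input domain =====

-- ===== PORT A =====
-- B replaces the 500-round in-place simulation by closed-form trajectories over the original data
-- (alternative decomposition); A mutates the caller's inner lists, B does not: the equivalence
-- proved here is about the return value only.
-- A-side helpers: literal transliterations; list indexing/assignment is totalized with pyGetD/pySetD —
-- Pre_removeCollided excludes exactly the inputs where the Python raises IndexError.
def pvCalculateParticle (position velocity acceleration : List Int) (runs : Int) :
    List Int × List Int × List Int :=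
  let pv := (PySem.List.pyRange 0 runs).foldl (fun (pv : List Int × List Int) _i =>
    let velocity := PySem.List.pySetD pv.2 0 (PySem.List.pyGetD pv.2 0 0 + PySem.List.pyGetD acceleration 0 0)
    let velocity := PySem.List.pySetD velocity 1 (PySem.List.pyGetD velocity 1 0 + PySem.List.pyGetD acceleration 1 0)
    let velocity := PySem.List.pySetD velocity 2 (PySem.List.pyGetD velocity 2 0 + PySem.List.pyGetD acceleration 2 0)
    let position := PySem.List.pySetD pv.1 0 (PySem.List.pyGetD pv.1 0 0 + PySem.List.pyGetD velocity 0 0)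
    let position := PySem.List.pySetD position 1 (PySem.List.pyGetD position 1 0 + PySem.List.pyGetD velocity 1 0)
    let position := PySem.List.pySetD position 2 (PySem.List.pyGetD position 2 0 + PySem.List.pyGetD velocity 2 0)
    (position, velocity)) (position, velocity)
  ([PySem.List.pyGetD pv.1 0 0, PySem.List.pyGetD pv.1 1 0, PySem.List.pyGetD pv.1 2 0],
   [PySem.List.pyGetD pv.2 0 0, PySem.List.pyGetD pv.2 1 0, PySem.List.pyGetD pv.2 2 0],
   acceleration)

def pvFormatPosition (newP : List Int) : String :=
  PySem.Str.join "," (newP.map PySem.Int.toStr)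

-- the body of A's `for iter in range(500)` loop, named so the proofs can speak about one step
def pvStepA (st : List (List Int) × List (List Int) × List (List Int) × List Int) :
    List (List Int) × List (List Int) × List (List Int) × List Int :=
  let positions := st.1
  let velocities := st.2.1
  let accelerations := st.2.2.1
  let allPos := st.2.2.2
  let pass1 := (PySem.List.pyRange 0 (positions.length : Int)).foldl (fun s i =>
      let r := pvCalculateParticle (PySem.List.pyGetD positions i [])
                 (PySem.List.pyGetD velocities i []) (PySem.List.pyGetD accelerations i []) 1
      let f := pvFormatPosition r.1
      if ¬ (PySem.Set.contains s.1 f) then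
        (PySem.Set.add s.1 f, s.2.1 ++ [r.1], s.2.2.1 ++ [r.2.1], s.2.2.2.1 ++ [r.2.2], s.2.2.2.2)
      else
        (s.1, s.2.1, s.2.2.1, s.2.2.2.1, PySem.Set.add s.2.2.2.2 (pvFormatPosition r.1)))
    ((PySem.Set.empty : PySem.Set String), ([] : List (List Int)), ([] : List (List Int)),
     ([] : List (List Int)), (PySem.Set.empty : PySem.Set String))
  let newPositions := pass1.2.1
  let newVelocities := pass1.2.2.1
  let newAccelerations := pass1.2.2.2.1
  let collided := pass1.2.2.2.2
  let pass2 := (PySem.List.pyRange 0 (newPositions.length : Int)).foldl (fun s i =>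
      if ¬ (PySem.Set.contains collided (pvFormatPosition (PySem.List.pyGetD newPositions i []))) then
        (s.1 ++ [PySem.List.pyGetD newPositions i []], s.2.1 ++ [PySem.List.pyGetD newVelocities i []],
         s.2.2 ++ [PySem.List.pyGetD newAccelerations i []])
      else s)
    (([] : List (List Int)), ([] : List (List Int)), ([] : List (List Int)))
  (pass2.1, pass2.2.1, pass2.2.2, allPos ++ [(pass2.1.length : Int)])

def removeCollided (positions : List (List Int)) (velocities : List (List Int)) (accelerations : List (List Int)) : List Int :=
  ((PySem.List.pyRange 0 500).foldl (fun st _iter => pvStepA st)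
    (positions, velocities, accelerations, ([] : List Int))).2.2.2

-- ===== PORT B =====
-- B-side helpers (from Source B): posAt(i, t) = closed-form position of original particle i after t
-- steps; the inner `tuple(... for k in range(3))` is the map over range(3).
def pvPosAt (positions velocities accelerations : List (List Int)) (i t : Int) : List Int :=
  let T := PySem.Int.floordiv (t * (t + 1)) 2
  (PySem.List.pyRange 0 3).map (fun k =>
    PySem.List.pyGetD (PySem.List.pyGetD positions i []) k 0
    + t * PySem.List.pyGetD (PySem.List.pyGetD velocities i []) k 0
    + T * PySem.List.pyGetD (PySem.List.pyGetD accelerations i []) k 0)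

-- the body of Source B's `for t in range(1, 501)` loop; `cnt[posAt(i, t)]` is ported as getD (the key
-- is always present, so Python's `[]` lookup returns exactly this value)
def pvStepB (positions velocities accelerations : List (List Int))
    (st : List Int × List Int) (t : Int) : List Int × List Int :=
  let active := st.1
  let cnt := active.foldl (fun (d : PySem.Dict (List Int) Int) i =>
      d.insert (pvPosAt positions velocities accelerations i t)
        (d.getD (pvPosAt positions velocities accelerations i t) 0 + 1)) PySem.Dict.empty
  let active' := active.filter (fun i =>
      cnt.getD (pvPosAt positions velocities accelerations i t) 0 == 1)
  (active', st.2 ++ [(active'.length : Int)])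

def removeCollided_alt (positions : List (List Int)) (velocities : List (List Int)) (accelerations : List (List Int)) : List Int :=
  ((PySem.List.pyRange 1 501).foldl (pvStepB positions velocities accelerations)
    (PySem.List.pyRange 0 (positions.length : Int), ([] : List Int))).2

-- ===== PRECONDITION & SPEC =====
-- Pre_ excludes exactly the inputs on which the Python A raises IndexError: an index i < len(positions)
-- with velocities[i]/accelerations[i] missing, or an accessed inner list with fewer than 3 components.
def Pre_removeCollided (positions : List (List Int)) (velocities : List (List Int)) (accelerations : List (List Int)) : Prop :=
  positions.length ≤ velocities.length ∧ positions.length ≤ accelerations.length ∧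
  ∀ i < positions.length, 3 ≤ (positions.getD i []).length ∧ 3 ≤ (velocities.getD i []).length ∧
    3 ≤ (accelerations.getD i []).length
instance (positions : List (List Int)) (velocities : List (List Int)) (accelerations : List (List Int)) : Decidable (Pre_removeCollided positions velocities accelerations) := by unfold Pre_removeCollided; infer_instance

def pvWitness_removeCollided : List (List Int) × List (List Int) × List (List Int) :=
  ([[1, 2, 3], [0, 0, 0]], [[1, 0, 0], [0, 1, 0]], [[0, 0, 1], [0, 0, 0]])

def Spec_removeCollided (positions : List (List Int)) (velocities : List (List Int)) (accelerations : List (List Int)) (out : List Int) : Prop := out = removeCollided_alt positions velocities accelerations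
instance (positions : List (List Int)) (velocities : List (List Int)) (accelerations : List (List Int)) (out : List Int) : Decidable (Spec_removeCollided positions velocities accelerations out) := by unfold Spec_removeCollided; infer_instance

-- ===== CLAIM (what is proved, stated in full; the proofs are below) =====
def Claim_equal_removeCollided : Prop := ∀ (positions : List (List Int)) (velocities : List (List Int)) (accelerations : List (List Int)), Dom_removeCollided positions velocities accelerations → Pre_removeCollided positions velocities accelerations → Spec_removeCollided positions velocities accelerations (removeCollided positions velocities accelerations)

-- ===== LEMMAS AND PROOFS =====

-- ---- part 1: A's step equals a count-then-filter step (pvStepC) over position triples ----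
theorem pvSetD_two (xs : List Int) (v : Int) : PySem.List.pySetD xs 2 v = xs.set 2 v :=
  PySem.List.pySetD_natCast xs 2 v
theorem pvSetD_zero (xs : List Int) (v : Int) : PySem.List.pySetD xs 0 v = xs.set 0 v :=
  PySem.List.pySetD_natCast xs 0 v
theorem pvSetD_one (xs : List Int) (v : Int) : PySem.List.pySetD xs 1 v = xs.set 1 v :=
  PySem.List.pySetD_natCast xs 1 v

-- one advance of one particle (velocity += acceleration; position += velocity, componentwise)
def pvAdvance (pos vel acc : List Int) : List Int × List Int × List Int :=
  let pv := (PySem.List.pyRange 0 3).foldl (fun (pv : List Int × List Int) k =>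
      let vel := PySem.List.pySetD pv.2 k (PySem.List.pyGetD pv.2 k 0 + PySem.List.pyGetD acc k 0)
      let pos := PySem.List.pySetD pv.1 k (PySem.List.pyGetD pv.1 k 0 + PySem.List.pyGetD vel k 0)
      (pos, vel)) (pos, vel)
  ([PySem.List.pyGetD pv.1 0 0, PySem.List.pyGetD pv.1 1 0, PySem.List.pyGetD pv.1 2 0],
   [PySem.List.pyGetD pv.2 0 0, PySem.List.pyGetD pv.2 1 0, PySem.List.pyGetD pv.2 2 0],
   acc)

theorem pvAdvance_eq (p v a : List Int) : pvCalculateParticle p v a 1 = pvAdvance p v a := by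
  simp only [pvCalculateParticle, pvAdvance,
    (show PySem.List.pyRange 0 1 = [0] by decide), (show PySem.List.pyRange 0 3 = [0, 1, 2] by decide),
    List.foldl_cons, List.foldl_nil, pvSetD_two, pvSetD_zero, pvSetD_one, PySem.List.pyGetD_ofNat']
  rcases p with _ | ⟨p0, _ | ⟨p1, _ | ⟨p2, pr⟩⟩⟩ <;>
    rcases v with _ | ⟨v0, _ | ⟨v1, _ | ⟨v2, vr⟩⟩⟩ <;>
      rcases a with _ | ⟨a0, _ | ⟨a1, _ | ⟨a2, ar⟩⟩⟩ <;>
        simp [List.getD]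

def pvNews {α : Type} (k : α → String) (u : PySem.Set String) : List α → List α
  | [] => []
  | t :: ts => if PySem.Set.contains u (k t) then pvNews k u ts
               else t :: pvNews k (PySem.Set.add u (k t)) ts
def pvColl {α : Type} (k : α → String) (u c : PySem.Set String) : List α → PySem.Set String
  | [] => c
  | t :: ts => if PySem.Set.contains u (k t) then pvColl k u (PySem.Set.add c (k t)) ts
               else pvColl k (PySem.Set.add u (k t)) c ts
theorem mem_pvColl {α : Type} (k : α → String) (L : List α) : ∀ (u c : PySem.Set String) (x : String),
    x ∈ pvColl k u c L ↔ x ∈ c ∨ (x ∈ L.map k ∧ (x ∈ u ∨ 2 ≤ (L.map k).count x)) := by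
  induction L with
  | nil => intro u c x; simp [pvColl]
  | cons t ts ih =>
    intro u c x
    by_cases hm : (k t) ∈ u
    · rw [pvColl, if_pos (by simp [hm]), ih]
      by_cases hx : x = k t
      · subst hx
        simp [hm]
      · simp [PySem.Set.mem_add, hx, Ne.symm hx]
    · rw [pvColl, if_neg (by simp [hm]), ih]
      by_cases hx : x = k t
      · subst hx
        simp [hm]
      · simp [PySem.Set.mem_add, hx, Ne.symm hx]

theorem pvNews_filter_pvColl {α : Type} (k : α → String) (L : List α) : ∀ (u c : PySem.Set String),
    (pvNews k u L).filter (fun t => !(PySem.Set.contains (pvColl k u c L) (k t))) =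
      L.filter (fun t => !(PySem.Set.contains u (k t)) && !(PySem.Set.contains c (k t))
                          && ((L.map k).count (k t) == 1)) := by
  induction L with
  | nil => intro u c; simp [pvNews, pvColl]
  | cons t ts ih =>
    intro u c
    by_cases hm : (k t) ∈ u
    · rw [pvNews, if_pos (by simp [hm]), pvColl, if_pos (by simp [hm]), ih]
      rw [List.filter_cons, if_neg (by simp [hm])]
      apply List.filter_congr
      intro s hs
      by_cases hks : k s = k t
      · simp [hks, hm]
      · simp [PySem.Set.mem_add, hks, Ne.symm hks]
    · rw [pvNews, if_neg (by simp [hm]), pvColl, if_neg (by simp [hm])]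
      have htail : (pvNews k (PySem.Set.add u (k t)) ts).filter
            (fun s => !(PySem.Set.contains (pvColl k (PySem.Set.add u (k t)) c ts) (k s))) =
          ts.filter (fun s => !(PySem.Set.contains u (k s)) && !(PySem.Set.contains c (k s))
                          && ((List.map k (t :: ts)).count (k s) == 1)) := by
        rw [ih]
        apply List.filter_congr
        intro s hs
        by_cases hks : k s = k t
        · have : k s ∈ List.map k ts := List.mem_map_of_mem hs
          simp [PySem.Set.mem_add, hks]
          exact fun _ _ h0 => (List.count_eq_zero.mp h0) (hks ▸ this)
        · simp [PySem.Set.mem_add, hks, Ne.symm hks]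
      rw [List.filter_cons, List.filter_cons]
      by_cases hc : (k t) ∈ c ∨ (k t) ∈ List.map k ts
      · rw [if_neg, if_neg, htail]
        · simp
          intro h
          rcases hc with h' | h'
          · tauto
          · intro hcc
            have : 1 ≤ (List.map k ts).count (k t) := List.count_pos_iff.mpr h'
            omega
        · simp [mem_pvColl, PySem.Set.mem_add]
          intro h
          rcases hc with h' | h'
          · exact absurd h' h
          · exact List.mem_map.mp h'
      · rw [not_or] at hc
        rw [if_pos, if_pos, htail]
        · simp [hm, hc.1, List.count_eq_zero_of_not_mem hc.2]
        · simp [mem_pvColl, PySem.Set.mem_add]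
          exact ⟨hc.1, fun x hx hkx => hc.2 (hkx ▸ List.mem_map_of_mem hx)⟩

theorem pvDigitChar_inj (a b : Nat) (ha : a < 10) (hb : b < 10) (h : a.digitChar = b.digitChar) : a = b := by
  interval_cases a <;> interval_cases b <;> simp_all [Nat.digitChar]
theorem pvToDigits_inj : Function.Injective (Nat.toDigits 10) := by
  intro n m h
  induction n using Nat.strong_induction_on generalizing m with
  | _ n ih =>
    rw [Nat.toDigits_eq_if (b := 10) (n := n) (by norm_num),
      Nat.toDigits_eq_if (b := 10) (n := m) (by norm_num)] at h
    by_cases hn : n < 10 <;> by_cases hm : m < 10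
    · rw [if_pos hn, if_pos hm] at h
      exact pvDigitChar_inj n m hn hm (by simpa using h)
    · rw [if_pos hn, if_neg hm] at h
      have hl := congrArg List.length h
      have hp := @Nat.length_toDigits_pos 10 (m / 10)
      simp only [List.length_cons, List.length_append, List.length_nil] at hl
      omega
    · rw [if_neg hn, if_pos hm] at h
      have hl := congrArg List.length h
      have hp := @Nat.length_toDigits_pos 10 (n / 10)
      simp only [List.length_cons, List.length_append, List.length_nil] at hl
      omega
    · rw [if_neg hn, if_neg hm] at h
      obtain ⟨h1, h2⟩ := List.append_inj' h (by simp)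
      have hq : n / 10 = m / 10 := ih (n / 10) (by omega) h1
      have hr : n % 10 = m % 10 := pvDigitChar_inj _ _ (by omega) (by omega) (by simpa using h2)
      omega
theorem pvComma_not_mem_toChars (n : Int) : ',' ∉ PySem.Int.toChars n := by
  have hd : ∀ k : Nat, ',' ∉ Nat.toDigits 10 k := by
    intro k hmem
    have := Nat.isDigit_of_mem_toDigits (by norm_num) (by norm_num) hmem
    simp [Char.isDigit] at this
  intro hmem
  unfold PySem.Int.toChars at hmem
  split at hmem
  · rcases List.mem_cons.mp hmem with h | h
    · exact absurd h (by decide)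
    · exact hd _ h
  · exact hd _ hmem
theorem pvToChars_inj (m n : Int) (h : PySem.Int.toChars m = PySem.Int.toChars n) : m = n := by
  unfold PySem.Int.toChars at h
  have hd : ∀ k : Nat, '-' ∉ Nat.toDigits 10 k := by
    intro k hmem
    have := Nat.isDigit_of_mem_toDigits (by norm_num) (by norm_num) hmem
    simp [Char.isDigit] at this
  split at h <;> split at h
  · simp at h
    have := pvToDigits_inj h
    omega
  · exact absurd (h ▸ List.mem_cons_self) (hd _)
  · exact absurd (h.symm ▸ List.mem_cons_self) (hd _)
  · have := pvToDigits_inj h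
    omega
theorem pvSplit_comma (xs : List Char) : ∀ (ys u v : List Char), ',' ∉ xs → ',' ∉ ys →
    xs ++ ',' :: u = ys ++ ',' :: v → xs = ys ∧ u = v := by
  induction xs with
  | nil =>
    intro ys u v _ hys h
    cases ys with
    | nil => simpa using h
    | cons y ys' =>
      simp at h
      exact absurd (h.1 ▸ List.mem_cons_self) hys
  | cons x xs' ih =>
    intro ys u v hxs hys h
    cases ys with
    | nil =>
      simp at h
      exact absurd (h.1 ▸ List.mem_cons_self) hxs
    | cons y ys' =>
      simp at h
      obtain ⟨hxy, hrest⟩ := h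
      obtain ⟨h1, h2⟩ := ih ys' u v (by simp at hxs; exact hxs.2) (by simp at hys; exact hys.2) hrest
      exact ⟨by rw [hxy, h1], h2⟩

theorem pvFormat_inj (a b c d e f : Int)
    (h : pvFormatPosition [a, b, c] = pvFormatPosition [d, e, f]) :
    ([a, b, c] : List Int) = [d, e, f] := by
  have h' := congrArg String.toList h
  simp only [pvFormatPosition, PySem.Str.toList_join, List.map_cons, List.map_nil,
    PySem.Int.toList_toStr, PySem.Chars.join_cons_cons, PySem.Chars.join_singleton,
    List.append_assoc] at h'
  rw [show ("," : String).toList = [','] from rfl] at h'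
  simp only [List.singleton_append] at h'
  obtain ⟨h1, h2⟩ := pvSplit_comma _ _ _ _ (pvComma_not_mem_toChars a) (pvComma_not_mem_toChars d) h'
  obtain ⟨h3, h4⟩ := pvSplit_comma _ _ _ _ (pvComma_not_mem_toChars b) (pvComma_not_mem_toChars e) h2
  rw [pvToChars_inj _ _ h1, pvToChars_inj _ _ h3, pvToChars_inj _ _ h4]

theorem pvPass1_char (F : Int → List Int × List Int × List Int) (I : List Int) :
    ∀ (u c : PySem.Set String) (P V Ac : List (List Int)),
    I.foldl (fun s i =>
      if ¬ (PySem.Set.contains s.1 (pvFormatPosition (F i).1)) then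
        (PySem.Set.add s.1 (pvFormatPosition (F i).1), s.2.1 ++ [(F i).1], s.2.2.1 ++ [(F i).2.1],
         s.2.2.2.1 ++ [(F i).2.2], s.2.2.2.2)
      else (s.1, s.2.1, s.2.2.1, s.2.2.2.1, PySem.Set.add s.2.2.2.2 (pvFormatPosition (F i).1)))
      (u, P, V, Ac, c)
    = (PySem.Set.update u ((I.map F).map (fun t => pvFormatPosition t.1)),
       P ++ (pvNews (fun t => pvFormatPosition t.1) u (I.map F)).map (fun t => t.1),
       V ++ (pvNews (fun t => pvFormatPosition t.1) u (I.map F)).map (fun t => t.2.1),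
       Ac ++ (pvNews (fun t => pvFormatPosition t.1) u (I.map F)).map (fun t => t.2.2),
       pvColl (fun t => pvFormatPosition t.1) u c (I.map F)) := by
  induction I with
  | nil => intro u c P V Ac; simp [pvNews, pvColl, PySem.Set.update_eq_foldl]
  | cons i I ih =>
    intro u c P V Ac
    rw [List.foldl_cons]
    by_cases hm : PySem.Set.contains u (pvFormatPosition (F i).1) = true
    · have hm' : pvFormatPosition (F i).1 ∈ u := by
        simpa [PySem.Set.contains_eq_decide] using hm
      rw [if_neg (by simp; exact hm'), ih]
      simp only [List.map_cons, pvNews, pvColl, hm, if_true, PySem.Set.update_eq_foldl,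
        List.foldl_cons, PySem.Set.add_of_mem (by exact hm')]
    · have hm' : pvFormatPosition (F i).1 ∉ u := by
        simpa [PySem.Set.contains_eq_decide] using hm
      rw [if_pos (by simp; exact hm'), ih]
      simp only [List.map_cons, pvNews, pvColl, hm, if_false, Bool.false_eq_true,
        PySem.Set.update_eq_foldl, List.foldl_cons, List.append_assoc, List.cons_append,
        List.nil_append]

theorem pvFoldFilter (c : PySem.Set String) (news : List (List Int × List Int × List Int)) :
    ∀ (X Y Z : List (List Int)),
    news.foldl (fun s t =>
      if ¬ (PySem.Set.contains c (pvFormatPosition t.1)) then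
        (s.1 ++ [t.1], s.2.1 ++ [t.2.1], s.2.2 ++ [t.2.2])
      else s) (X, Y, Z)
    = (X ++ (news.filter (fun t => !(PySem.Set.contains c (pvFormatPosition t.1)))).map (fun t => t.1),
       Y ++ (news.filter (fun t => !(PySem.Set.contains c (pvFormatPosition t.1)))).map (fun t => t.2.1),
       Z ++ (news.filter (fun t => !(PySem.Set.contains c (pvFormatPosition t.1)))).map (fun t => t.2.2)) := by
  induction news with
  | nil => intro X Y Z; simp
  | cons t ts ih =>
    intro X Y Z
    rw [List.foldl_cons, List.filter_cons]
    by_cases hm : PySem.Set.contains c (pvFormatPosition t.1) = true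
    · have hc' : pvFormatPosition t.1 ∈ c := by
        simpa [PySem.Set.contains_eq_decide] using hm
      rw [if_neg (by simp; exact hc'), ih]
      simp [hc']
    · have hc' : pvFormatPosition t.1 ∉ c := by
        simpa [PySem.Set.contains_eq_decide] using hm
      rw [if_pos (by simp; exact hc'), ih]
      simp [hc']

theorem pvPass2_char (c : PySem.Set String) (news : List (List Int × List Int × List Int)) :
    (PySem.List.pyRange 0 ((news.map (fun t => t.1)).length : Int)).foldl (fun s i =>
      if ¬ (PySem.Set.contains c (pvFormatPosition (PySem.List.pyGetD (news.map (fun t => t.1)) i []))) then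
        (s.1 ++ [PySem.List.pyGetD (news.map (fun t => t.1)) i []],
         s.2.1 ++ [PySem.List.pyGetD (news.map (fun t => t.2.1)) i []],
         s.2.2 ++ [PySem.List.pyGetD (news.map (fun t => t.2.2)) i []])
      else s) (([] : List (List Int)), ([] : List (List Int)), ([] : List (List Int)))
    = ((news.filter (fun t => !(PySem.Set.contains c (pvFormatPosition t.1)))).map (fun t => t.1),
       (news.filter (fun t => !(PySem.Set.contains c (pvFormatPosition t.1)))).map (fun t => t.2.1),
       (news.filter (fun t => !(PySem.Set.contains c (pvFormatPosition t.1)))).map (fun t => t.2.2)) := by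
  have hb : ∀ (s : List (List Int) × List (List Int) × List (List Int)) (i : Int),
      (if ¬ (PySem.Set.contains c (pvFormatPosition (PySem.List.pyGetD (news.map (fun t => t.1)) i []))) then
        (s.1 ++ [PySem.List.pyGetD (news.map (fun t => t.1)) i []],
         s.2.1 ++ [PySem.List.pyGetD (news.map (fun t => t.2.1)) i []],
         s.2.2 ++ [PySem.List.pyGetD (news.map (fun t => t.2.2)) i []])
      else s)
      = (fun (s : List (List Int) × List (List Int) × List (List Int))
           (t : List Int × List Int × List Int) =>
          if ¬ (PySem.Set.contains c (pvFormatPosition t.1)) then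
            (s.1 ++ [t.1], s.2.1 ++ [t.2.1], s.2.2 ++ [t.2.2])
          else s) s (PySem.List.pyGetD news i ([], [], [])) := by
    intro s i
    have e1 : PySem.List.pyGetD (news.map (fun t => t.1)) i []
        = (PySem.List.pyGetD news i ([], [], [])).1 :=
      PySem.List.pyGetD_map (fun t => t.1) news i ([], [], [])
    have e2 : PySem.List.pyGetD (news.map (fun t => t.2.1)) i []
        = (PySem.List.pyGetD news i ([], [], [])).2.1 :=
      PySem.List.pyGetD_map (fun t => t.2.1) news i ([], [], [])
    have e3 : PySem.List.pyGetD (news.map (fun t => t.2.2)) i []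
        = (PySem.List.pyGetD news i ([], [], [])).2.2 :=
      PySem.List.pyGetD_map (fun t => t.2.2) news i ([], [], [])
    rw [e1, e2, e3]
  rw [funext fun s => funext fun i => hb s i]
  have hlen : ((news.map (fun t => t.1)).length : Int) = (news.length : Int) := by simp
  rw [hlen]
  rw [show (PySem.List.pyRange 0 (news.length : Int)) = PySem.List.pyRange 0 (PySem.List.len news) from rfl]
  refine Eq.trans (PySem.List.foldl_pyRange_pyGetD news ([], [], [])
    (fun s t =>
      if ¬ (PySem.Set.contains c (pvFormatPosition t.1)) then
        (s.1 ++ [t.1], s.2.1 ++ [t.2.1], s.2.2 ++ [t.2.2])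
      else s) ([], [], []) (le_refl 0)) ?_
  simpa using pvFoldFilter c news [] [] []

theorem pvCount_bridge (L : List (List Int × List Int × List Int)) (t : List Int × List Int × List Int)
    (h3 : ∀ s ∈ L, ∃ x y z, s.1 = ([x, y, z] : List Int)) (ht : ∃ x y z, t.1 = ([x, y, z] : List Int)) :
    (L.map (fun s => pvFormatPosition s.1)).count (pvFormatPosition t.1) = (L.map (fun s => s.1)).count t.1 := by
  induction L with
  | nil => simp
  | cons s L ih =>
    simp only [List.map_cons, List.count_cons]
    rw [ih (fun x hx => h3 x (List.mem_cons_of_mem s hx))]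
    congr 1
    obtain ⟨x, y, z, hs⟩ := h3 s List.mem_cons_self
    obtain ⟨x', y', z', ht'⟩ := ht
    have : (pvFormatPosition s.1 = pvFormatPosition t.1) ↔ (s.1 = t.1) := by
      constructor
      · intro h
        rw [hs, ht'] at h ⊢
        exact pvFormat_inj _ _ _ _ _ _ h
      · intro h; rw [h]
    simp [beq_iff_eq, this]

theorem pvAdvance_shape (p v a : List Int) : ∃ x y z, (pvAdvance p v a).1 = ([x, y, z] : List Int) :=
  ⟨_, _, _, rfl⟩

-- the count-then-filter characterisation of one step: advance everyone, keep position-count == 1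
def pvStepC (st : List (List Int) × List (List Int) × List (List Int) × List Int) :
    List (List Int) × List (List Int) × List (List Int) × List Int :=
  let positions := st.1
  let velocities := st.2.1
  let accelerations := st.2.2.1
  let allPos := st.2.2.2
  let advanced := (PySem.List.pyRange 0 (positions.length : Int)).foldl (fun acc i =>
      acc ++ [pvAdvance (PySem.List.pyGetD positions i []) (PySem.List.pyGetD velocities i [])
               (PySem.List.pyGetD accelerations i [])]) []
  let counts := advanced.foldl (fun d t => d.insert t.1 (d.getD t.1 0 + 1))
      (PySem.Dict.empty : PySem.Dict (List Int) Int)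
  let survivors := advanced.filter (fun t => counts.getD t.1 0 == 1)
  let positions' := survivors.map (fun t => t.1)
  let velocities' := survivors.map (fun t => t.2.1)
  let accelerations' := survivors.map (fun t => t.2.2)
  (positions', velocities', accelerations', allPos ++ [(positions'.length : Int)])

theorem pvStep_eq (st : List (List Int) × List (List Int) × List (List Int) × List Int) :
    pvStepA st = pvStepC st := by
  obtain ⟨ps, vs, acs, ap⟩ := st
  simp only [pvStepA, pvStepC, pvAdvance_eq]
  rw [pvPass1_char (fun i => pvAdvance (PySem.List.pyGetD ps i [])
    (PySem.List.pyGetD vs i []) (PySem.List.pyGetD acs i []))]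
  rw [PySem.List.foldl_append_singleton_eq_map]
  simp only [List.nil_append]
  rw [pvPass2_char]
  rw [pvNews_filter_pvColl]
  set L := List.map (fun i => pvAdvance (PySem.List.pyGetD ps i [])
    (PySem.List.pyGetD vs i []) (PySem.List.pyGetD acs i [])) (PySem.List.pyRange 0 (ps.length : Int)) with hL
  have h3 : ∀ s ∈ L, ∃ x y z, s.1 = ([x, y, z] : List Int) := by
    intro s hs
    rw [hL] at hs
    obtain ⟨i, _, rfl⟩ := List.mem_map.mp hs
    exact pvAdvance_shape _ _ _
  have hcnt : L.foldl (fun d t => d.insert t.1 (d.getD t.1 0 + 1))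
      (PySem.Dict.empty : PySem.Dict (List Int) Int)
      = PySem.Dict.counter (L.map (fun t => t.1)) := by
    rw [← PySem.Dict.foldl_insert_getD_add_one_eq_counter, hL, List.map_map, List.foldl_map,
      List.foldl_map]
    rfl
  rw [hcnt]
  have hfilter : L.filter (fun t =>
        !(PySem.Set.contains PySem.Set.empty (pvFormatPosition t.1))
          && !(PySem.Set.contains PySem.Set.empty (pvFormatPosition t.1))
          && ((L.map (fun t => pvFormatPosition t.1)).count (pvFormatPosition t.1) == 1))
      = L.filter (fun t => (PySem.Dict.counter (L.map (fun t => t.1))).getD t.1 0 == 1) := by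
    apply List.filter_congr
    intro t htL
    simp only [PySem.Dict.getD_counter]
    rw [pvCount_bridge L t h3 (h3 t htL)]
    simp
  rw [hfilter]

-- ---- part 2: closed-form trajectories drive pvStepC ----
-- velocity of original particle i after t steps (proof-only companion of pvPosAt)
def pvVelAt (positions velocities accelerations : List (List Int)) (i t : Int) : List Int :=
  (PySem.List.pyRange 0 3).map (fun k =>
    PySem.List.pyGetD (PySem.List.pyGetD velocities i []) k 0
    + t * PySem.List.pyGetD (PySem.List.pyGetD accelerations i []) k 0)

theorem pvTri_succ (t : Int) :
    PySem.Int.floordiv ((t + 1) * (t + 2)) 2 = PySem.Int.floordiv (t * (t + 1)) 2 + (t + 1) := by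
  obtain ⟨k, hk⟩ := Int.even_mul_succ_self t
  have h1 : t * (t + 1) = 2 * k := by omega
  have h2 : (t + 1) * (t + 2) = 2 * (k + t + 1) := by ring_nf; ring_nf at h1; omega
  rw [h1, h2, PySem.Int.floordiv_eq_ediv_of_pos (by norm_num),
    PySem.Int.floordiv_eq_ediv_of_pos (by norm_num)]
  omega

theorem pvAdvance_gen (p0 p1 p2 v0 v1 v2 : Int) (pr vr a : List Int) :
    pvAdvance (p0 :: p1 :: p2 :: pr) (v0 :: v1 :: v2 :: vr) a =
      ([p0 + (v0 + PySem.List.pyGetD a 0 0), p1 + (v1 + PySem.List.pyGetD a 1 0),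
        p2 + (v2 + PySem.List.pyGetD a 2 0)],
       [v0 + PySem.List.pyGetD a 0 0, v1 + PySem.List.pyGetD a 1 0, v2 + PySem.List.pyGetD a 2 0],
       a) := by
  simp [pvAdvance, (show PySem.List.pyRange 0 3 = [0, 1, 2] by decide),
    pvSetD_zero, pvSetD_one, pvSetD_two, PySem.List.pyGetD_ofNat', List.getD]

theorem pvPosAt_def (P V Ac : List (List Int)) (i t : Int) :
    pvPosAt P V Ac i t =
      [PySem.List.pyGetD (PySem.List.pyGetD P i []) 0 0
         + t * PySem.List.pyGetD (PySem.List.pyGetD V i []) 0 0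
         + PySem.Int.floordiv (t * (t + 1)) 2 * PySem.List.pyGetD (PySem.List.pyGetD Ac i []) 0 0,
       PySem.List.pyGetD (PySem.List.pyGetD P i []) 1 0
         + t * PySem.List.pyGetD (PySem.List.pyGetD V i []) 1 0
         + PySem.Int.floordiv (t * (t + 1)) 2 * PySem.List.pyGetD (PySem.List.pyGetD Ac i []) 1 0,
       PySem.List.pyGetD (PySem.List.pyGetD P i []) 2 0
         + t * PySem.List.pyGetD (PySem.List.pyGetD V i []) 2 0
         + PySem.Int.floordiv (t * (t + 1)) 2 * PySem.List.pyGetD (PySem.List.pyGetD Ac i []) 2 0] := by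
  simp [pvPosAt, (show PySem.List.pyRange 0 3 = [0, 1, 2] by decide), PySem.List.pyGetD_ofNat']

theorem pvVelAt_def (P V Ac : List (List Int)) (i t : Int) :
    pvVelAt P V Ac i t =
      [PySem.List.pyGetD (PySem.List.pyGetD V i []) 0 0
         + t * PySem.List.pyGetD (PySem.List.pyGetD Ac i []) 0 0,
       PySem.List.pyGetD (PySem.List.pyGetD V i []) 1 0
         + t * PySem.List.pyGetD (PySem.List.pyGetD Ac i []) 1 0,
       PySem.List.pyGetD (PySem.List.pyGetD V i []) 2 0
         + t * PySem.List.pyGetD (PySem.List.pyGetD Ac i []) 2 0] := by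
  simp [pvVelAt, (show PySem.List.pyRange 0 3 = [0, 1, 2] by decide), PySem.List.pyGetD_ofNat']

theorem pvTriple_ext (x0 x1 x2 u0 u1 u2 y0 y1 y2 w0 w1 w2 : Int) (a : List Int)
    (h0 : x0 = y0) (h1 : x1 = y1) (h2 : x2 = y2)
    (g0 : u0 = w0) (g1 : u1 = w1) (g2 : u2 = w2) :
    (([x0, x1, x2], [u0, u1, u2], a) : List Int × List Int × List Int) =
      ([y0, y1, y2], [w0, w1, w2], a) := by
  subst h0 h1 h2 g0 g1 g2; rfl

theorem pvLen3 (l : List Int) (h : 3 ≤ l.length) : ∃ a b c r, l = a :: b :: c :: r := by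
  rcases l with _ | ⟨a, _ | ⟨b, _ | ⟨c, r⟩⟩⟩ <;>
    first
    | exact ⟨_, _, _, _, rfl⟩
    | simp at h

theorem pvAdvance_closed (P V Ac : List (List Int)) (i t : Int) :
    pvAdvance (pvPosAt P V Ac i t) (pvVelAt P V Ac i t) (PySem.List.pyGetD Ac i []) =
      (pvPosAt P V Ac i (t + 1), pvVelAt P V Ac i (t + 1), PySem.List.pyGetD Ac i []) := by
  rw [pvPosAt_def, pvVelAt_def, pvAdvance_gen, pvPosAt_def, pvVelAt_def,
    show t + 1 + 1 = t + 2 by ring, pvTri_succ]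
  apply pvTriple_ext <;> ring

theorem pvAdvance_base (P V Ac : List (List Int)) (i : Int)
    (hp : 3 ≤ (PySem.List.pyGetD P i []).length) (hv : 3 ≤ (PySem.List.pyGetD V i []).length) :
    pvAdvance (PySem.List.pyGetD P i []) (PySem.List.pyGetD V i []) (PySem.List.pyGetD Ac i []) =
      (pvPosAt P V Ac i 1, pvVelAt P V Ac i 1, PySem.List.pyGetD Ac i []) := by
  obtain ⟨p0, p1, p2, pr, hP⟩ := pvLen3 _ hp
  obtain ⟨v0, v1, v2, vr, hV⟩ := pvLen3 _ hv
  rw [pvPosAt_def, pvVelAt_def, hP, hV, pvAdvance_gen,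
    show PySem.Int.floordiv (1 * (1 + 1)) 2 = 1 by decide]
  simp only [PySem.List.pyGetD_ofNat', List.getD, one_mul]
  apply pvTriple_ext <;> (simp; try ring)

-- pvStepC evaluated when the advanced list is a map over an index list
theorem pvStepC_eval (ps vs as_ ap : _) (l : List Int) (F : Int → List Int × List Int × List Int)
    (h : (PySem.List.pyRange 0 (ps.length : Int)).map
        (fun i => pvAdvance (PySem.List.pyGetD ps i []) (PySem.List.pyGetD vs i [])
          (PySem.List.pyGetD as_ i [])) = l.map F) :
    pvStepC (ps, vs, as_, ap) =
      ((l.filter (fun x => ((l.map (fun y => (F y).1)).count (F x).1 : Int) == 1)).map (fun x => (F x).1),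
       (l.filter (fun x => ((l.map (fun y => (F y).1)).count (F x).1 : Int) == 1)).map (fun x => (F x).2.1),
       (l.filter (fun x => ((l.map (fun y => (F y).1)).count (F x).1 : Int) == 1)).map (fun x => (F x).2.2),
       ap ++ [((l.filter (fun x => ((l.map (fun y => (F y).1)).count (F x).1 : Int) == 1)).length : Int)]) := by
  simp only [pvStepC]
  rw [PySem.List.foldl_append_singleton_eq_map, List.nil_append, h]
  have hcnt : (List.foldl (fun (d : PySem.Dict (List Int) Int) (t : List Int × List Int × List Int) =>
        d.insert t.1 (d.getD t.1 0 + 1)) PySem.Dict.empty (l.map F))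
      = PySem.Dict.counter ((l.map F).map (fun t => t.1)) := by
    rw [← PySem.Dict.foldl_insert_getD_add_one_eq_counter, List.foldl_map, List.map_map,
      List.foldl_map]
    rfl
  rw [hcnt]
  have hpred : (l.map F).filter (fun t =>
        (PySem.Dict.counter ((l.map F).map (fun t => t.1))).getD t.1 0 == 1)
      = (l.filter (fun x => ((l.map (fun y => (F y).1)).count (F x).1 : Int) == 1)).map F := by
    rw [List.filter_map]
    congr 1
    apply List.filter_congr
    intro x _
    simp only [Function.comp, PySem.Dict.getD_counter, List.map_map]
    rfl
  rw [hpred]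
  simp [List.map_map, Function.comp]

-- the B-side step in counter form
theorem pvStepB_eval (P V Ac : List (List Int)) (active ap : List Int) (t : Int) :
    pvStepB P V Ac (active, ap) t =
      (active.filter (fun i =>
        ((active.map (fun j => pvPosAt P V Ac j t)).count (pvPosAt P V Ac i t) : Int) == 1),
       ap ++ [((active.filter (fun i =>
        ((active.map (fun j => pvPosAt P V Ac j t)).count (pvPosAt P V Ac i t) : Int) == 1)).length : Int)]) := by
  simp only [pvStepB]
  have hcnt : (List.foldl (fun (d : PySem.Dict (List Int) Int) (i : Int) =>
        d.insert (pvPosAt P V Ac i t) (d.getD (pvPosAt P V Ac i t) 0 + 1)) PySem.Dict.empty active)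
      = PySem.Dict.counter (active.map (fun j => pvPosAt P V Ac j t)) := by
    rw [← PySem.Dict.foldl_insert_getD_add_one_eq_counter, List.foldl_map]
  rw [hcnt]
  simp only [PySem.Dict.getD_counter]

-- the A-side state generated by an index set at time t
def pvAstate (P V Ac : List (List Int)) (t : Int) (s : List Int × List Int) :
    List (List Int) × List (List Int) × List (List Int) × List Int :=
  (s.1.map (fun i => pvPosAt P V Ac i t), s.1.map (fun i => pvVelAt P V Ac i t),
   s.1.map (fun i => PySem.List.pyGetD Ac i []), s.2)

theorem pvStep_sim (P V Ac : List (List Int)) (t : Int) (active ap : List Int) :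
    pvStepC (pvAstate P V Ac t (active, ap)) =
      pvAstate P V Ac (t + 1) (pvStepB P V Ac (active, ap) (t + 1)) := by
  have h : (PySem.List.pyRange 0 (((active.map (fun i => pvPosAt P V Ac i t)).length : Nat) : Int)).map
      (fun j => pvAdvance (PySem.List.pyGetD (active.map (fun i => pvPosAt P V Ac i t)) j [])
        (PySem.List.pyGetD (active.map (fun i => pvVelAt P V Ac i t)) j [])
        (PySem.List.pyGetD (active.map (fun i => PySem.List.pyGetD Ac i [])) j []))
      = active.map (fun i => (pvPosAt P V Ac i (t + 1), pvVelAt P V Ac i (t + 1),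
          PySem.List.pyGetD Ac i [])) := by
    have hb : (fun j : Int => pvAdvance (PySem.List.pyGetD (active.map (fun i => pvPosAt P V Ac i t)) j [])
        (PySem.List.pyGetD (active.map (fun i => pvVelAt P V Ac i t)) j [])
        (PySem.List.pyGetD (active.map (fun i => PySem.List.pyGetD Ac i [])) j []))
        = (fun j : Int => (fun trip : List Int × List Int × List Int =>
            pvAdvance trip.1 trip.2.1 trip.2.2)
          (PySem.List.pyGetD (active.map (fun i => (pvPosAt P V Ac i t, pvVelAt P V Ac i t,
            PySem.List.pyGetD Ac i []))) j (([] : List Int), ([] : List Int), ([] : List Int)))) := by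
      funext j
      have e1 := PySem.List.pyGetD_map (fun trip : List Int × List Int × List Int => trip.1)
        (active.map (fun i => (pvPosAt P V Ac i t, pvVelAt P V Ac i t, PySem.List.pyGetD Ac i []))) j
        (([] : List Int), ([] : List Int), ([] : List Int))
      have e2 := PySem.List.pyGetD_map (fun trip : List Int × List Int × List Int => trip.2.1)
        (active.map (fun i => (pvPosAt P V Ac i t, pvVelAt P V Ac i t, PySem.List.pyGetD Ac i []))) j
        (([] : List Int), ([] : List Int), ([] : List Int))
      have e3 := PySem.List.pyGetD_map (fun trip : List Int × List Int × List Int => trip.2.2)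
        (active.map (fun i => (pvPosAt P V Ac i t, pvVelAt P V Ac i t, PySem.List.pyGetD Ac i []))) j
        (([] : List Int), ([] : List Int), ([] : List Int))
      simp only [List.map_map, Function.comp_def] at e1 e2 e3
      rw [e1, e2, e3]
    rw [hb]
    have hlen : (((active.map (fun i => pvPosAt P V Ac i t)).length : Nat) : Int)
        = (((active.map (fun i => (pvPosAt P V Ac i t, pvVelAt P V Ac i t,
            PySem.List.pyGetD Ac i []))).length : Nat) : Int) := by simp
    have hcomp : (PySem.List.pyRange 0 (((active.map (fun i => (pvPosAt P V Ac i t,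
          pvVelAt P V Ac i t, PySem.List.pyGetD Ac i []))).length : Nat) : Int)).map
        (fun j => (fun trip : List Int × List Int × List Int =>
            pvAdvance trip.1 trip.2.1 trip.2.2)
          (PySem.List.pyGetD (active.map (fun i => (pvPosAt P V Ac i t, pvVelAt P V Ac i t,
            PySem.List.pyGetD Ac i []))) j (([] : List Int), ([] : List Int), ([] : List Int))))
        = ((PySem.List.pyRange 0 (((active.map (fun i => (pvPosAt P V Ac i t,
            pvVelAt P V Ac i t, PySem.List.pyGetD Ac i []))).length : Nat) : Int)).map
          (fun j => PySem.List.pyGetD (active.map (fun i => (pvPosAt P V Ac i t,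
            pvVelAt P V Ac i t, PySem.List.pyGetD Ac i []))) j
            (([] : List Int), ([] : List Int), ([] : List Int)))).map
          (fun trip : List Int × List Int × List Int => pvAdvance trip.1 trip.2.1 trip.2.2) := by
      rw [List.map_map]
      rfl
    rw [hlen, hcomp, PySem.List.map_pyGetD_pyRange_zero', List.map_map]
    simp only [Function.comp_def, pvAdvance_closed]
  rw [show pvAstate P V Ac t (active, ap) = (active.map (fun i => pvPosAt P V Ac i t),
      active.map (fun i => pvVelAt P V Ac i t), active.map (fun i => PySem.List.pyGetD Ac i []), ap)
    from rfl]
  rw [pvStepC_eval _ _ _ _ active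
    (fun i => (pvPosAt P V Ac i (t + 1), pvVelAt P V Ac i (t + 1), PySem.List.pyGetD Ac i [])) h,
    pvStepB_eval]
  simp only [pvAstate]

theorem pvFoldlConst {α β : Type} (f : α → α) (l : List β) (init : α) :
    l.foldl (fun st _ => f st) init = f^[l.length] init := by
  induction l generalizing init with
  | nil => rfl
  | cons x xs ih => simp [List.foldl_cons, ih, Function.iterate_succ_apply]

theorem pvSimul (P V Ac : List (List Int)) (m : Nat) : ∀ (t : Int) (active ap : List Int),
    pvStepC^[m] (pvAstate P V Ac t (active, ap)) =
      pvAstate P V Ac (t + m) ((PySem.List.pyRange (t + 1) (t + 1 + m)).foldl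
        (pvStepB P V Ac) (active, ap)) := by
  induction m with
  | zero =>
    intro t active ap
    have h0 : PySem.List.pyRange (t + 1) (t + 1 + ((0 : Nat) : Int)) = [] :=
      PySem.List.pyRange_one_eq_nil (by norm_num)
    rw [h0]
    norm_num
  | succ m ih =>
    intro t active ap
    rw [Function.iterate_succ_apply, pvStep_sim, ih (t + 1)]
    have hr : PySem.List.pyRange (t + 1) (t + 1 + ((m + 1 : Nat) : Int)) =
        (t + 1) :: PySem.List.pyRange (t + 1 + 1) (t + 1 + 1 + (m : Int)) := by
      rw [PySem.List.pyRange_one_cons (show t + 1 < t + 1 + ((m + 1 : Nat) : Int) by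
        push_cast; omega)]
      congr 1
      push_cast; ring
    rw [hr, List.foldl_cons, Prod.mk.eta,
      show t + ((m + 1 : Nat) : Int) = t + 1 + (m : Int) by push_cast; ring]

theorem pvBase_sim (P V Ac : List (List Int))
    (hpre : Pre_removeCollided P V Ac) :
    pvStepC (P, V, Ac, ([] : List Int)) =
      pvAstate P V Ac 1 (pvStepB P V Ac (PySem.List.pyRange 0 (P.length : Int), ([] : List Int)) 1) := by
  obtain ⟨hlv, hla, hlen⟩ := hpre
  have h : (PySem.List.pyRange 0 (P.length : Int)).map
      (fun i => pvAdvance (PySem.List.pyGetD P i []) (PySem.List.pyGetD V i [])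
        (PySem.List.pyGetD Ac i []))
      = (PySem.List.pyRange 0 (P.length : Int)).map
          (fun i => (pvPosAt P V Ac i 1, pvVelAt P V Ac i 1, PySem.List.pyGetD Ac i [])) := by
    apply List.map_congr_left
    intro i hi
    rw [PySem.List.mem_pyRange_one] at hi
    have hiP : i < (P.length : Int) := hi.2
    have hiN : i.toNat < P.length := by omega
    have hiV : i.toNat < V.length := by omega
    have hp : 3 ≤ (PySem.List.pyGetD P i []).length := by
      rw [PySem.List.pyGetD_eq_getElem _ _ hi.1 hiP]
      have := (hlen i.toNat hiN).1
      rwa [List.getD_eq_getElem _ _ hiN] at this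
    have hv : 3 ≤ (PySem.List.pyGetD V i []).length := by
      rw [PySem.List.pyGetD_eq_getElem _ _ hi.1 (by omega)]
      have := (hlen i.toNat hiN).2.1
      rwa [List.getD_eq_getElem _ _ hiV] at this
    exact pvAdvance_base P V Ac i hp hv
  rw [pvStepC_eval _ _ _ _ (PySem.List.pyRange 0 (P.length : Int))
    (fun i => (pvPosAt P V Ac i 1, pvVelAt P V Ac i 1, PySem.List.pyGetD Ac i [])) h,
    pvStepB_eval]
  simp only [pvAstate]

-- ===== VERDICT (by name: the statement is the Claim_ definition above) =====
theorem removeCollided_spec : Claim_equal_removeCollided := by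
  intro P V Ac _hDom hPre
  unfold Spec_removeCollided removeCollided removeCollided_alt
  have hA : (fun (st : List (List Int) × List (List Int) × List (List Int) × List Int) (_iter : Int) => pvStepA st)
      = (fun st _iter => pvStepC st) := by
    funext st _iter; exact pvStep_eq st
  rw [hA, pvFoldlConst]
  rw [show (PySem.List.pyRange 0 500).length = 500 by
    rw [PySem.List.length_pyRange_one]; decide]
  rw [show (500 : Nat) = 499 + 1 from rfl, Function.iterate_succ_apply, pvBase_sim P V Ac hPre,
    pvSimul P V Ac 499 1]
  rw [PySem.List.pyRange_one_cons (show (1 : Int) < 501 by norm_num), List.foldl_cons]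
  norm_num [pvAstate]
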